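-- pv_equiv track=rewrite | github.com/KatherineCG/Coding-Interview-Chinese- | 4-替换空格.py | Replace3
-- ===== SOURCE A (Python) =====
-- def Replace3(s):
--     if not isinstance(s, str) and len(s) <= 0 and s == None:
--         return
--     spacenum = 0
--     for i in s:
--         if i == ' ':
--             spacenum += 1
--     newStrLen = len(s) + 2*spacenum
--     newStr = newStrLen * [None]
--     indexOfOriginal = len(s) - 1
--     indexOfNew = newStrLen - 1
--     while indexOfNew >= 0 and indexOfNew >= indexOfOriginal:
--         if s[indexOfOriginal] == ' ':
--             newStr[indexOfNew-2:indexOfNew+1] = ['%', '2', '0']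
--             indexOfNew -= 3
--             indexOfOriginal -= 1
--         else:
--             newStr[indexOfNew] = s[indexOfOriginal]
--             indexOfNew -= 1
--             indexOfOriginal -= 1
--     return "".join(newStr)
-- ===== SOURCE B (Python) =====
-- def Replace3(s):
--     if not isinstance(s, str) and len(s) <= 0 and s == None:
--         return
--     out = []
--     for ch in s:
--         out.append('%20' if ch == ' ' else ch)
--     return ''.join(out)
-- ===== Notes on version B (the rewrite author's own statement) =====
-- stated objective: simpler
-- what changed: Replaces the count-spaces pass, pre-sized None array and backward two-pointer slice-filling with a single forward pass that appends the replacement (or the character) to a list and joins once.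
import Mathlib
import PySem

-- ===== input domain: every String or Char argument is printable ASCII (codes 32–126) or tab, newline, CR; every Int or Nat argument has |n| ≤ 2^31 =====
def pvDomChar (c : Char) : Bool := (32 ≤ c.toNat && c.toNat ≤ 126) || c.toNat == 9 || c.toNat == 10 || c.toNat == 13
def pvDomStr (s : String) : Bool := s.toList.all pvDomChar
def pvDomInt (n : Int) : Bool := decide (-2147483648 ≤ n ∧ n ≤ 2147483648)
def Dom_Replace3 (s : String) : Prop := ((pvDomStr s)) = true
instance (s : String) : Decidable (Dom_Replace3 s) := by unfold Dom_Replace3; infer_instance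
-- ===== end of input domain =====

set_option maxRecDepth 8000


-- B is a simpler single forward pass (append '%20' or the char, join once) instead of A's
-- count-spaces pass + pre-sized None array + backward two-pointer fill; same return value.

-- ===== PORT A =====
-- the while loop of A; fuel bounds the iterations (the loop decreases indexOfNew each step),
-- the `none` branch of pyGet? corresponds to a Python IndexError (never reached on the loop's states)
def pvLoopA (l : List Char) : Nat → List (Option Char) → Int → Int → List (Option Char)
  | 0, buf, _, _ => buf
  | fuel+1, buf, io, inn =>
    if inn ≥ 0 ∧ inn ≥ io then
      match PySem.List.pyGet? l io with
      | none => buf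
      | some c =>
        if c = ' ' then
          -- newStr[inn-2:inn+1] = ['%','2','0'] (a length-preserving slice assignment here)
          pvLoopA l fuel (buf.take (inn-2).toNat ++ [some '%', some '2', some '0'] ++ buf.drop (inn+1).toNat) (io-1) (inn-3)
        else
          pvLoopA l fuel (buf.set inn.toNat (some c)) (io-1) (inn-1)
    else buf

def Replace3 (s : String) : String :=
  let l := s.toList
  let spacenum : Int := l.foldl (fun n c => if c = ' ' then n+1 else n) 0
  let newStrLen : Int := (l.length : Int) + 2*spacenum
  let newStr := List.replicate newStrLen.toNat (none : Option Char)
  let res := pvLoopA l newStrLen.toNat newStr ((l.length : Int) - 1) (newStrLen - 1)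
  String.ofList (res.filterMap id)   -- "".join(newStr): all cells are filled when the loop ends

-- ===== PORT B =====
def Replace3_alt (s : String) : String :=
  let out := s.toList.foldl (fun acc ch => acc ++ [if ch = ' ' then "%20" else String.ofList [ch]]) ([] : List String)
  PySem.Str.join "" out

-- ===== PRECONDITION & SPEC =====
def Spec_Replace3 (s : String) (out : String) : Prop := out = Replace3_alt s
instance (s : String) (out : String) : Decidable (Spec_Replace3 s out) := by unfold Spec_Replace3; infer_instance

-- ===== CLAIM (what is proved, stated in full; the proofs are below) =====
def Claim_equal_Replace3 : Prop := ∀ (s : String), Dom_Replace3 s → Spec_Replace3 s (Replace3 s)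

-- ===== LEMMAS AND PROOFS =====
def pvF (c : Char) : List Char := if c = ' ' then ['%', '2', '0'] else [c]
def pvExp (l : List Char) : List Char := l.flatMap pvF
def pvCnt (l : List Char) : Nat := (l.filter (· = ' ')).length

theorem pvCnt_foldl (l : List Char) (a : Int) :
    l.foldl (fun n c => if c = ' ' then n+1 else n) a = a + pvCnt l := by
  induction l generalizing a with
  | nil => simp [pvCnt]
  | cons c t ih => by_cases h : c = ' ' <;> simp [pvCnt, h, ih] at * <;> omega

theorem pvExp_take_succ (l : List Char) (n : Nat) (h : n < l.length) :
    pvCnt (l.take (n+1)) = pvCnt (l.take n) + (if l[n] = ' ' then 1 else 0) := by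
  rw [List.take_succ]
  simp only [pvCnt, List.getElem?_eq_getElem h, Option.toList_some, List.filter_append]
  by_cases h' : l[n] = ' ' <;> simp [h']

theorem pvLoopA_main (l : List Char) (n : Nat) (junk : List (Option Char)) (fuel : Nat)
    (hn : n ≤ l.length) (hj : junk.length = n + 2 * pvCnt (l.take n)) (hf : junk.length ≤ fuel) :
    pvLoopA l fuel (junk ++ (pvExp (l.drop n)).map some) ((n : Int) - 1) ((junk.length : Int) - 1)
      = (pvExp l).map some := by
  induction n generalizing junk fuel with
  | zero =>
    have hj0 : junk = [] := by
      simpa using List.length_eq_zero_iff.mp (by simpa [pvCnt] using hj)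
    subst hj0
    cases fuel <;> simp [pvLoopA]
  | succ n ih =>
    have hn' : n < l.length := hn
    have hjpos : 1 ≤ junk.length := by omega
    obtain ⟨f, rfl⟩ : ∃ f, fuel = f + 1 := ⟨fuel - 1, by omega⟩
    rw [pvLoopA]
    push_cast
    have hcond : ((junk.length : Int) - 1 ≥ 0 ∧ (junk.length : Int) - 1 ≥ (n : Int) + 1 - 1) := by
      constructor <;> [omega; (push_cast; omega)]
    rw [if_pos (by push_cast at hcond ⊢; exact hcond)]
    have hget : PySem.List.pyGet? l ((n : Int) + 1 - 1) = some l[n] := by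
      have : ((n : Int) + 1 - 1) = (n : Nat) := by push_cast; omega
      rw [this, PySem.List.pyGet?_natCast]
      simp [List.getElem?_eq_getElem hn']
    rw [hget]
    dsimp only
    have hdropn : l.drop n = l[n] :: l.drop (n+1) := List.drop_eq_getElem_cons hn'
    have hcnt := pvExp_take_succ l n hn'
    by_cases hsp : l[n] = ' '
    · rw [if_pos hsp]
      have hk : junk.length = n + 3 + 2 * pvCnt (l.take n) := by
        rw [hj, hcnt, if_pos hsp]; ring
      have h1 : ((junk.length : Int) - 1 - 2).toNat = junk.length - 3 := by omega
      have h2 : ((junk.length : Int) - 1 + 1).toNat = junk.length := by omega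
      rw [h1, h2]
      have htake : (junk ++ (pvExp (l.drop (n+1))).map some).take (junk.length - 3)
          = junk.take (junk.length - 3) := List.take_append_of_le_length (by omega)
      have hdrop : (junk ++ (pvExp (l.drop (n+1))).map some).drop junk.length
          = (pvExp (l.drop (n+1))).map some := by
        simpa using List.drop_left junk ((pvExp (l.drop (n+1))).map some)
      rw [htake, hdrop]
      have hrw : junk.take (junk.length - 3) ++ [some '%', some '2', some '0']
            ++ (pvExp (l.drop (n+1))).map some
          = junk.take (junk.length - 3) ++ (pvExp (l.drop n)).map some := by
        rw [hdropn]; simp [pvExp, pvF, hsp]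
      rw [hrw]
      have hlen : (junk.take (junk.length - 3)).length = n + 2 * pvCnt (l.take n) := by
        simp; omega
      have hio : (n : Int) + 1 - 1 - 1 = (n : Int) - 1 := by ring
      have hin : (junk.length : Int) - 1 - 3 = ((junk.take (junk.length - 3)).length : Int) - 1 := by
        rw [hlen]; omega
      rw [hio, hin]
      exact ih (junk.take (junk.length - 3)) f (le_of_lt hn') hlen (by omega)
    · rw [if_neg hsp]
      have hk : junk.length = n + 1 + 2 * pvCnt (l.take n) := by
        rw [hj, hcnt, if_neg hsp]; ring
      have h1 : ((junk.length : Int) - 1).toNat = junk.length - 1 := by omega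
      rw [h1]
      have hset : (junk ++ (pvExp (l.drop (n+1))).map some).set (junk.length - 1) (some l[n])
          = junk.take (junk.length - 1) ++ (pvExp (l.drop n)).map some := by
        rw [List.set_append_left _ _ (by omega),
            List.set_eq_take_append_cons_drop, if_pos (by omega)]
        have : junk.drop (junk.length - 1 + 1) = [] := by
          apply List.drop_eq_nil_of_le; omega
        rw [this, hdropn]
        simp only [pvExp, pvF, List.flatMap_cons, if_neg hsp, List.map_append, List.map_cons, List.map_nil]
        simp
      rw [hset]
      have hlen : (junk.take (junk.length - 1)).length = n + 2 * pvCnt (l.take n) := by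
        simp; omega
      have hio : (n : Int) + 1 - 1 - 1 = (n : Int) - 1 := by ring
      have hin : (junk.length : Int) - 1 - 1 = ((junk.take (junk.length - 1)).length : Int) - 1 := by
        rw [hlen]; omega
      rw [hio, hin]
      exact ih (junk.take (junk.length - 1)) f (le_of_lt hn') hlen (by omega)

theorem Replace3_eq_exp (s : String) : Replace3 s = String.ofList (pvExp s.toList) := by
  unfold Replace3
  dsimp only
  set l := s.toList with hl
  have hsp : l.foldl (fun n c => if c = ' ' then n+1 else n) 0 = (pvCnt l : Int) := by
    simpa using pvCnt_foldl l 0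
  rw [hsp]
  have hlen : ((l.length : Int) + 2 * (pvCnt l : Int)).toNat = l.length + 2 * pvCnt l := by omega
  rw [hlen]
  have hrep : List.replicate (l.length + 2 * pvCnt l) (none : Option Char)
      = List.replicate (l.length + 2 * pvCnt l) (none : Option Char) ++ (pvExp (l.drop l.length)).map some := by
    simp [pvExp]
  rw [hrep]
  have hmain := pvLoopA_main l l.length (List.replicate (l.length + 2 * pvCnt l) (none : Option Char))
      (l.length + 2 * pvCnt l) le_rfl (by simp) (by simp)
  simp only [List.length_replicate] at hmain
  have hin : (l.length : Int) + 2 * (pvCnt l : Int) - 1 = ((l.length + 2 * pvCnt l : Nat) : Int) - 1 := by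
    push_cast; ring
  rw [hin, hmain]
  congr 1
  simp [List.filterMap_map]

theorem pvFoldl_out (l : List Char) (acc : List String) :
    l.foldl (fun acc ch => acc ++ [if ch = ' ' then "%20" else String.ofList [ch]]) acc
      = acc ++ l.map (fun ch => if ch = ' ' then "%20" else String.ofList [ch]) := by
  induction l generalizing acc with
  | nil => simp
  | cons c t ih => simp [ih]

theorem pvJoin_exp (l : List Char) :
    PySem.Chars.join [] ((l.map (fun ch => if ch = ' ' then "%20" else String.ofList [ch])).map String.toList)
      = pvExp l := by
  induction l with
  | nil => simp [pvExp, PySem.Chars.join_nil]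
  | cons c t ih =>
    cases t with
    | nil =>
      simp only [List.map_cons, List.map_nil, PySem.Chars.join_singleton]
      by_cases h : c = ' ' <;> simp [pvExp, pvF, h]
    | cons d t' =>
      simp only [List.map_cons] at ih ⊢
      rw [PySem.Chars.join_cons_cons, ih]
      by_cases h : c = ' ' <;> simp [pvExp, pvF, h]

theorem Replace3_alt_eq_exp (s : String) : Replace3_alt s = String.ofList (pvExp s.toList) := by
  unfold Replace3_alt
  dsimp only
  rw [pvFoldl_out, List.nil_append]
  have h1 : (PySem.Str.join "" (s.toList.map (fun ch => if ch = ' ' then "%20" else String.ofList [ch]))).toList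
      = pvExp s.toList := by
    rw [PySem.Str.toList_join]
    simpa using pvJoin_exp s.toList
  have h2 := congrArg String.ofList h1
  rwa [String.ofList_toList] at h2

-- ===== VERDICT (by name: the statement is the Claim_ definition above) =====
theorem Replace3_spec : Claim_equal_Replace3 := by
  intro s _
  unfold Spec_Replace3
  rw [Replace3_eq_exp, Replace3_alt_eq_exp]
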